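-- pv_equiv track=rewrite | github.com/Twojekrypto/Dolomite-dashboard | plan_earn_subaccount_history_incremental.py | _split_ranges
-- ===== SOURCE A (Python) =====
-- import math
-- from typing import Dict, List, Optional, Sequence
--
-- def _split_ranges(total_count: int, worker_count: int) -> List[tuple[int, int]]:
--     shard_size = math.ceil(total_count / max(1, worker_count))
--     ranges = []
--     for idx in range(worker_count):
--         start_index = idx * shard_size
--         end_index = min(total_count, start_index + shard_size)
--         if start_index >= end_index:
--             continue
--         ranges.append((start_index, end_index))
--     return ranges
-- ===== SOURCE B (Python) =====
-- def _split_ranges(total_count, worker_count):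
--     if total_count <= 0 or worker_count <= 0:
--         return []
--     shard_size = -(-total_count // worker_count)   # exact integer ceiling division
--     shards = -(-total_count // shard_size)         # number of non-empty shards
--     full = [(i * shard_size, (i + 1) * shard_size) for i in range(shards - 1)]
--     return full + [((shards - 1) * shard_size, total_count)]
-- ===== Notes on version B (the rewrite author's own statement) =====
-- stated objective: simpler
-- what changed: B computes the number of non-empty shards in closed form with integer ceiling division and emits the full shards by a comprehension plus one clamped final shard, instead of A's loop over all worker indices with a per-iteration min and skip test.
import Mathlib
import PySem

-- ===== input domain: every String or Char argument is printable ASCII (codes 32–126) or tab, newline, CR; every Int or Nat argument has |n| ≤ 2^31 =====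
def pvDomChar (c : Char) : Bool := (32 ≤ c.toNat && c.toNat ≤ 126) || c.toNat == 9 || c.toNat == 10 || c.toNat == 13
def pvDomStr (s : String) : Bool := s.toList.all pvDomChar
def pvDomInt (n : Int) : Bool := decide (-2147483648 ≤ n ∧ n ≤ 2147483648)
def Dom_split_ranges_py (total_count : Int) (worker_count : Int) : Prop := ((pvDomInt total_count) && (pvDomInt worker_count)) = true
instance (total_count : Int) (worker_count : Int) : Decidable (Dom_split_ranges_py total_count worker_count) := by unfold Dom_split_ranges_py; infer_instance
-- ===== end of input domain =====

-- B replaces A's index loop with a min/skip test in every iteration by a closed-form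
-- shard count and a plain comprehension of full shards plus the clamped final shard (objective: simpler).

-- ===== PORT A =====
-- math.ceil(total_count / max(1, worker_count)) is ported as exact integer ceiling
-- division -((-t) // w); this is exact on the domain |t| ≤ 2^31 (the float quotient
-- never rounds across an integer there).
def split_ranges_py (total_count : Int) (worker_count : Int) : List (Int × Int) :=
  let shard_size : Int := -(PySem.Int.floordiv (-total_count) (max 1 worker_count))
  (PySem.List.pyRange 0 worker_count 1).foldl
    (fun ranges idx =>
      let start_index := idx * shard_size
      let end_index := min total_count (start_index + shard_size)
      if start_index ≥ end_index then ranges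
      else ranges ++ [(start_index, end_index)])
    []

-- ===== PORT B =====
def split_ranges_py_alt (total_count : Int) (worker_count : Int) : List (Int × Int) :=
  if total_count ≤ 0 ∨ worker_count ≤ 0 then []
  else
    let shard_size : Int := -(PySem.Int.floordiv (-total_count) worker_count)
    let shards : Int := -(PySem.Int.floordiv (-total_count) shard_size)
    let full := (PySem.List.pyRange 0 (shards - 1) 1).map
      (fun i => (i * shard_size, (i + 1) * shard_size))
    full ++ [((shards - 1) * shard_size, total_count)]

-- ===== PRECONDITION & SPEC =====
def Spec_split_ranges_py (total_count : Int) (worker_count : Int) (out : List (Int × Int)) : Prop := out = split_ranges_py_alt total_count worker_count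
instance (total_count : Int) (worker_count : Int) (out : List (Int × Int)) : Decidable (Spec_split_ranges_py total_count worker_count out) := by unfold Spec_split_ranges_py; infer_instance

-- ===== CLAIM (what is proved, stated in full; the proofs are below) =====
def Claim_equal_split_ranges_py : Prop := ∀ (total_count : Int) (worker_count : Int), Dom_split_ranges_py total_count worker_count → Spec_split_ranges_py total_count worker_count (split_ranges_py total_count worker_count)

-- ===== LEMMAS AND PROOFS =====

-- A's loop body in filter/map form ('continue' branch first, as in the Python).
theorem foldl_skip_or_append {α β : Type} (P : α → Prop) [DecidablePred P] (f : α → β)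
    (l : List α) (acc : List β) :
    l.foldl (fun acc x => if P x then acc else acc ++ [f x]) acc
      = acc ++ (l.filter (fun x => decide (¬ P x))).map f := by
  induction l generalizing acc with
  | nil => simp
  | cons x t ih =>
      by_cases h : P x <;> simp [h, ih, List.append_assoc]

-- ceiling division characterisation: s = ⌈t / w⌉ for 0 < w
theorem ceil_bounds {t w : Int} (hw : 0 < w) :
    (-(PySem.Int.floordiv (-t) w) - 1) * w < t ∧ t ≤ -(PySem.Int.floordiv (-t) w) * w := by
  have h := (PySem.Int.neg_floordiv_neg_eq_iff_of_pos (a := t) (b := w)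
    (q := -(PySem.Int.floordiv (-t) w)) hw).mp rfl
  constructor
  · linarith [h.1]
  · exact h.2

theorem split_ranges_py_spec : Claim_equal_split_ranges_py := by
  intro t w _
  unfold Spec_split_ranges_py split_ranges_py split_ranges_py_alt
  by_cases hdeg : t ≤ 0 ∨ w ≤ 0
  · -- degenerate cases: both sides are []
    simp only [hdeg, if_true]
    rcases hdeg with ht | hw
    · -- t ≤ 0: shard_size ≤ 0, every iteration is skipped
      set s : Int := -(PySem.Int.floordiv (-t) (max 1 w)) with hs
      have hwpos : (0:Int) < max 1 w := by positivity
      have hb := ceil_bounds (t := t) (w := max 1 w) hwpos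
      have hs0 : s ≤ 0 := by
        by_contra hcon
        have h1s : (1:Int) ≤ s := by omega
        nlinarith [hb.1, hwpos]
      rw [foldl_skip_or_append (P := fun idx : Int => idx * s ≥ min t (idx * s + s))]
      have : (PySem.List.pyRange 0 w 1).filter
          (fun idx => decide (¬ idx * s ≥ min t (idx * s + s))) = [] := by
        apply List.filter_eq_nil_iff.mpr
        intro idx _
        simp only [decide_not, Bool.not_eq_true', decide_eq_false_iff_not, not_not]
        have : idx * s + s ≤ idx * s := by linarith
        exact le_trans (min_le_right _ _) this
      rw [this]
      rfl
    · -- w ≤ 0: the range is empty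
      rw [PySem.List.pyRange_one_eq_nil hw]
      rfl
  · have ht : (0:Int) < t := by omega
    have hw : (0:Int) < w := by omega
    simp only [if_neg hdeg]
    have hmax : max 1 w = w := max_eq_right (by linarith)
    rw [hmax]
    set s : Int := -(PySem.Int.floordiv (-t) w) with hs
    have hbs := ceil_bounds (t := t) (w := w) hw
    have hs1 : 1 ≤ s := by nlinarith [hbs.2]
    set k : Int := -(PySem.Int.floordiv (-t) s) with hk
    have hbk := ceil_bounds (t := t) (w := s) (by linarith)
    have hk1 : 1 ≤ k := by nlinarith [hbk.2]
    have hkw : k ≤ w := by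
      by_contra hcon
      have h1 : w ≤ k - 1 := by omega
      have : w * s ≤ (k - 1) * s := by
        apply mul_le_mul_of_nonneg_right h1 (by linarith)
      nlinarith [hbk.1, hbs.2]
    rw [foldl_skip_or_append (P := fun idx : Int => idx * s ≥ min t (idx * s + s))]
    rw [List.nil_append]
    -- the filter keeps exactly the indices idx < k
    have hfilter : (PySem.List.pyRange 0 w 1).filter
        (fun idx => decide (¬ idx * s ≥ min t (idx * s + s)))
        = PySem.List.pyRange 0 k 1 := by
      rw [PySem.List.pyRange_one_append 0 k w (by linarith) hkw, List.filter_append]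
      have h1 : (PySem.List.pyRange 0 k 1).filter
          (fun idx => decide (¬ idx * s ≥ min t (idx * s + s))) = PySem.List.pyRange 0 k 1 := by
        apply List.filter_eq_self.mpr
        intro idx hidx
        rw [PySem.List.mem_pyRange_one] at hidx
        simp only [decide_eq_true_iff, ge_iff_le, not_le]
        have hlt : idx * s < t := by
          have : idx ≤ k - 1 := by omega
          have h2 : idx * s ≤ (k - 1) * s := mul_le_mul_of_nonneg_right this (by linarith)
          linarith [hbk.1]
        exact lt_min hlt (by linarith)
      have h2 : (PySem.List.pyRange k w 1).filter
          (fun idx => decide (¬ idx * s ≥ min t (idx * s + s))) = [] := by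
        apply List.filter_eq_nil_iff.mpr
        intro idx hidx
        rw [PySem.List.mem_pyRange_one] at hidx
        simp only [decide_not, Bool.not_eq_true', decide_eq_false_iff_not, not_not]
        have : t ≤ idx * s := by
          have h3 : k * s ≤ idx * s := mul_le_mul_of_nonneg_right hidx.1 (by linarith)
          linarith [hbk.2]
        exact le_trans (min_le_left _ _) this
      rw [h1, h2, List.append_nil]
    rw [hfilter]
    -- split off the last index k-1 and identify the maps
    have hsplit := PySem.List.pyRange_one_succ_right (a := 0) (b := k - 1) (by omega)
    rw [show k - 1 + 1 = k by ring] at hsplit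
    rw [hsplit, List.map_append]
    congr 1
    · apply List.map_congr_left
      intro idx hidx
      rw [PySem.List.mem_pyRange_one] at hidx
      have : idx * s + s ≤ t := by
        have h4 : idx + 1 ≤ k - 1 := by omega
        have h5 : (idx + 1) * s ≤ (k - 1) * s := mul_le_mul_of_nonneg_right h4 (by linarith)
        nlinarith [hbk.1]
      rw [min_eq_right this]
      ring_nf
    · simp only [List.map_cons, List.map_nil]
      have : min t ((k - 1) * s + s) = t := by
        apply min_eq_left
        nlinarith [hbk.2]
      rw [this]
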